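-- pv_equiv track=rewrite | github.com/hjsad1994/Aspect-based-Sentiment-Analysis-for-Mobile-Phone-Reviews | scripts/split_dataset_phases.py | compute_phase2_chunk_sizes
-- ===== SOURCE A (Python) =====
-- from typing import List
--
-- TARGET_PHASE2_CHUNK = 3500  # desired chunk size for phase 2
--
-- MIN_PHASE2_CHUNK = 3000
--
-- MAX_PHASE2_CHUNK = 4000
--
-- def compute_phase2_chunk_sizes(total_rows: int) -> List[int]:
--     if total_rows <= 0:
--         return []
--
--     chunk_count = max(1, round(total_rows / TARGET_PHASE2_CHUNK))
--
--     # Adjust to keep chunk sizes within desired range when possible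
--     while chunk_count > 1 and total_rows / chunk_count > MAX_PHASE2_CHUNK:
--         chunk_count += 1
--     while chunk_count > 1 and total_rows / chunk_count < MIN_PHASE2_CHUNK:
--         chunk_count -= 1
--
--     base = total_rows // chunk_count
--     remainder = total_rows % chunk_count
--
--     chunk_sizes = [base + (1 if i < remainder else 0) for i in range(chunk_count)]
--
--     # If last chunk falls below minimum, merge with previous chunk if possible
--     if len(chunk_sizes) >= 2 and chunk_sizes[-1] < MIN_PHASE2_CHUNK:
--         chunk_sizes[-2] += chunk_sizes[-1]
--         chunk_sizes.pop()
--
--     return chunk_sizes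
-- ===== SOURCE B (Python) =====
-- from typing import List
--
-- TARGET_PHASE2_CHUNK = 3500
-- MIN_PHASE2_CHUNK = 3000
-- MAX_PHASE2_CHUNK = 4000
--
-- def compute_phase2_chunk_sizes(total_rows: int) -> List[int]:
--     if total_rows <= 0:
--         return []
--
--     # Closed-form chunk count: aim at the target size, never exceed MAX,
--     # stay at or above MIN when more than one chunk is needed.
--     chunks = max(1, round(total_rows / TARGET_PHASE2_CHUNK))
--     chunks = max(chunks, (total_rows + MAX_PHASE2_CHUNK - 1) // MAX_PHASE2_CHUNK)
--     chunks = max(1, min(chunks, total_rows // MIN_PHASE2_CHUNK))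
--
--     base, rem = divmod(total_rows, chunks)
--     sizes = [base + 1] * rem + [base] * (chunks - rem)
--
--     # A last chunk below the minimum is folded into its neighbour.
--     if len(sizes) >= 2 and sizes[-1] < MIN_PHASE2_CHUNK:
--         sizes = sizes[:-2] + [sizes[-2] + sizes[-1]]
--     return sizes
-- ===== Notes on version B (the rewrite author's own statement) =====
-- stated objective: simpler
-- what changed: The two adjustment while-loops are replaced by a closed-form chunk count max(1, min(max(round(n/3500), ceil(n/4000)), n//3000)), and the chunk list is built as two replicated runs instead of a per-index comprehension.
import Mathlib
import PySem

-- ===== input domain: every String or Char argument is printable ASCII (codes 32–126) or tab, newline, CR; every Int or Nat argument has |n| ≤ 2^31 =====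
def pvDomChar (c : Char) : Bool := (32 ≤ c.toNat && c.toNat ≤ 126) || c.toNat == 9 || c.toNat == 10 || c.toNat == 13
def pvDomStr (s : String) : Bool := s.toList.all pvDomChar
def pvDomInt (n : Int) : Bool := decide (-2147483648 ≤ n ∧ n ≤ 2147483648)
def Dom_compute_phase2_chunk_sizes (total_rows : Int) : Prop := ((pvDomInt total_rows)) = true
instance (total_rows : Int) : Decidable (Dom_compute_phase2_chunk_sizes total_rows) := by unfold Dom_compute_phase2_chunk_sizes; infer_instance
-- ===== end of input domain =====

-- B replaces A's two adjustment while-loops by a closed-form chunk count (objective: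
-- simpler); return values proved equal on the whole domain.

-- ===== PORT A =====
-- round(total_rows / 3500): integer half-even rounding; exact on Dom (|n| ≤ 2^31 < 2^53,
-- so CPython's correctly-rounded float division and banker's round() agree with this rule)
def pyRound3500 (t : Int) : Int :=
  if 2 * PySem.Int.mod t 3500 > 3500 ∨
      (2 * PySem.Int.mod t 3500 = 3500 ∧ PySem.Int.mod (PySem.Int.floordiv t 3500) 2 = 1) then
    PySem.Int.floordiv t 3500 + 1
  else PySem.Int.floordiv t 3500

-- while chunk_count > 1 and total_rows / chunk_count > 4000: chunk_count += 1
-- (the float comparison t/cc > 4000 is exact as 4000*cc < t on Dom)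
def adjUp (t cc : Int) : Int :=
  if 1 < cc ∧ 4000 * cc < t then adjUp t (cc + 1) else cc
termination_by (t - 4000 * cc).toNat
decreasing_by omega

-- while chunk_count > 1 and total_rows / chunk_count < 3000: chunk_count -= 1
def adjDown (t cc : Int) : Int :=
  if 1 < cc ∧ t < 3000 * cc then adjDown t (cc - 1) else cc
termination_by cc.toNat
decreasing_by omega

def compute_phase2_chunk_sizes (total_rows : Int) : List Int :=
  if total_rows ≤ 0 then []
  else
    let cc := adjDown total_rows (adjUp total_rows (max 1 (pyRound3500 total_rows)))
    let base := PySem.Int.floordiv total_rows cc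
    let rem := PySem.Int.mod total_rows cc
    let sizes := (PySem.List.pyRange 0 cc 1).map (fun i => base + (if i < rem then 1 else 0))
    -- chunk_sizes[-2] += chunk_sizes[-1]; chunk_sizes.pop()  (the pyGetD defaults are
    -- unreachable: guarded by len(chunk_sizes) >= 2, evaluated first by 'and')
    if 2 ≤ sizes.length ∧ PySem.List.pyGetD sizes (-1) 0 < 3000 then
      (sizes.set (sizes.length - 2)
        (PySem.List.pyGetD sizes (-2) 0 + PySem.List.pyGetD sizes (-1) 0)).dropLast
    else sizes

-- ===== PORT B =====
-- Source B also calls round(total_rows / 3500): same primitive, ported by the same helper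
def compute_phase2_chunk_sizes_alt (total_rows : Int) : List Int :=
  if total_rows ≤ 0 then []
  else
    let c1 := max 1 (pyRound3500 total_rows)
    let c2 := max c1 (PySem.Int.floordiv (total_rows + 4000 - 1) 4000)
    let c := max 1 (min c2 (PySem.Int.floordiv total_rows 3000))
    let base := PySem.Int.floordiv total_rows c
    let rem := PySem.Int.mod total_rows c
    let sizes := List.replicate rem.toNat (base + 1) ++ List.replicate (c - rem).toNat base
    -- sizes[-1], sizes[-2] guarded by len(sizes) >= 2, so the defaults are unreachable
    if 2 ≤ sizes.length ∧ PySem.List.pyGetD sizes (-1) 0 < 3000 then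
      PySem.List.slice sizes none (some (-2)) ++
        [PySem.List.pyGetD sizes (-2) 0 + PySem.List.pyGetD sizes (-1) 0]
    else sizes

-- ===== PRECONDITION & SPEC =====
def Spec_compute_phase2_chunk_sizes (total_rows : Int) (out : List Int) : Prop := out = compute_phase2_chunk_sizes_alt total_rows
instance (total_rows : Int) (out : List Int) : Decidable (Spec_compute_phase2_chunk_sizes total_rows out) := by unfold Spec_compute_phase2_chunk_sizes; infer_instance

-- ===== CLAIM (what is proved, stated in full; the proofs are below) =====
def Claim_equal_compute_phase2_chunk_sizes : Prop := ∀ (total_rows : Int), Dom_compute_phase2_chunk_sizes total_rows → Spec_compute_phase2_chunk_sizes total_rows (compute_phase2_chunk_sizes total_rows)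

-- ===== LEMMAS AND PROOFS =====

-- (total_rows + 3999) // 4000 is the ceiling of t/4000
theorem ceil4000_eq (t : Int) :
    PySem.Int.floordiv (t + 4000 - 1) 4000 = -(PySem.Int.floordiv (-t) 4000) := by
  obtain ⟨h1, h2⟩ := (PySem.Int.floordiv_eq_iff_of_pos
    (a := t + 4000 - 1) (b := 4000) (by omega)).mp rfl
  obtain ⟨h3, h4⟩ := (PySem.Int.floordiv_eq_iff_of_pos
    (a := -t) (b := 4000) (by omega)).mp rfl
  omega

-- the up-loop lands on max cc ⌈t/4000⌉ when started at cc ≥ 2, else stops at once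
theorem adjUp_eq (t cc : Int) :
    adjUp t cc = if 2 ≤ cc then max cc (-(PySem.Int.floordiv (-t) 4000)) else cc := by
  obtain ⟨hm1, hm2⟩ := (PySem.Int.neg_floordiv_neg_eq_iff_of_pos
    (a := t) (b := 4000) (by omega)).mp rfl
  fun_induction adjUp t cc with
  | case1 cc h ih => rw [ih]; omega
  | case2 cc h => omega

-- the down-loop lands on max 1 (min cc (t // 3000)) when started at cc ≥ 1
theorem adjDown_eq (t cc : Int) :
    adjDown t cc = if 1 ≤ cc then max 1 (min cc (PySem.Int.floordiv t 3000)) else cc := by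
  obtain ⟨hf1, hf2⟩ := (PySem.Int.floordiv_eq_iff_of_pos
    (a := t) (b := 3000) (by omega)).mp rfl
  fun_induction adjDown t cc with
  | case1 cc h ih => rw [ih]; omega
  | case2 cc h => omega

-- if round(t/3500) ≤ 1 (so the loops are skipped) then t ≤ 5249, hence t // 3000 ≤ 1
theorem round_le_one (t : Int) (h : pyRound3500 t ≤ 1) : t ≤ 5249 := by
  unfold pyRound3500 at h
  obtain ⟨hq1, hq2⟩ := (PySem.Int.floordiv_eq_iff_of_pos
    (a := t) (b := 3500) (by omega)).mp rfl
  have h0 := PySem.Int.mod_nonneg t (b := 3500) (by omega)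
  have h1 := PySem.Int.mod_lt t (b := 3500) (by omega)
  have hmod := PySem.Int.floordiv_mul_add_mod t 3500
  set q := PySem.Int.floordiv t 3500 with hqdef
  set r := PySem.Int.mod t 3500 with hrdef
  split at h
  · omega
  · rename_i hcond
    push Not at hcond
    by_cases hq : q = 1
    · have h2 : PySem.Int.mod q 2 = 1 := by rw [hq]; decide
      have h3 := hcond.2
      omega
    · omega

-- both versions compute the same chunk count
theorem count_eq (t : Int) (ht : 0 < t) :
    adjDown t (adjUp t (max 1 (pyRound3500 t))) =
      max 1 (min (max (max 1 (pyRound3500 t)) (PySem.Int.floordiv (t + 4000 - 1) 4000))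
        (PySem.Int.floordiv t 3000)) := by
  rw [ceil4000_eq]
  obtain ⟨hf1, hf2⟩ := (PySem.Int.floordiv_eq_iff_of_pos
    (a := t) (b := 3000) (by omega)).mp rfl
  by_cases h2 : 2 ≤ max 1 (pyRound3500 t)
  · rw [adjUp_eq, if_pos h2, adjDown_eq, if_pos (by omega)]
  · have ht5 : t ≤ 5249 := round_le_one t (by omega)
    rw [show max 1 (pyRound3500 t) = 1 by omega, adjUp_eq, if_neg (by omega),
      adjDown_eq, if_pos (by omega)]
    obtain ⟨hm1, hm2⟩ := (PySem.Int.neg_floordiv_neg_eq_iff_of_pos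
      (a := t) (b := 4000) (by omega)).mp rfl
    omega

-- the comprehension over range(c) equals the two replicated runs
theorem build_eq (base rem c : Int) (h0 : 0 ≤ rem) (h1 : rem ≤ c) :
    (PySem.List.pyRange 0 c 1).map (fun i => base + (if i < rem then 1 else 0)) =
      List.replicate rem.toNat (base + 1) ++ List.replicate (c - rem).toNat base := by
  apply List.ext_getElem
  · simp [PySem.List.length_pyRange_one]; omega
  · intro i h₁ h₂
    simp only [List.getElem_map, PySem.List.getElem_pyRange_one]
    rw [List.getElem_append]
    simp only [List.getElem_replicate, List.length_replicate]
    split <;> split <;> omega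

-- merging the last two elements: set-then-dropLast equals take ++ [x]
theorem merge_eq {α : Type} (L : List α) (x : α) (h : 2 ≤ L.length) :
    (L.set (L.length - 2) x).dropLast = L.take (L.length - 2) ++ [x] := by
  apply List.ext_getElem
  · simp; omega
  · intro i h₁ h₂
    simp only [List.length_dropLast, List.length_set, List.length_append,
      List.length_take, List.length_singleton] at h₁ h₂
    rw [List.getElem_dropLast, List.getElem_set, List.getElem_append]
    simp only [List.length_take, List.getElem_take, List.getElem_singleton]
    split <;> split <;> first | rfl | omega

-- ===== VERDICT (by name: the statement is the Claim_ definition above) =====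
theorem compute_phase2_chunk_sizes_spec : Claim_equal_compute_phase2_chunk_sizes := by
  intro t _
  unfold Spec_compute_phase2_chunk_sizes compute_phase2_chunk_sizes compute_phase2_chunk_sizes_alt
  by_cases ht : t ≤ 0
  · simp [ht]
  · push Not at ht
    simp only [if_neg (by omega : ¬ t ≤ 0)]
    rw [count_eq t ht]
    set c := max 1 (min (max (max 1 (pyRound3500 t)) (PySem.Int.floordiv (t + 4000 - 1) 4000))
      (PySem.Int.floordiv t 3000)) with hc
    have hcpos : 0 < c := by omega
    have hr0 := PySem.Int.mod_nonneg t (b := c) (by omega)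
    have hr1 := PySem.Int.mod_lt t (b := c) (by omega)
    set base := PySem.Int.floordiv t c with hbase
    set rem := PySem.Int.mod t c with hrem
    rw [build_eq base rem c hr0 (by omega)]
    set L := List.replicate rem.toNat (base + 1) ++ List.replicate (c - rem).toNat base with hL
    by_cases h2 : 2 ≤ L.length
    · by_cases hlast : PySem.List.pyGetD L (-1) 0 < 3000
      · rw [if_pos ⟨h2, hlast⟩, if_pos ⟨h2, hlast⟩,
          PySem.List.slice_to_neg_ofNat L 2 (by omega),
          merge_eq L _ (by omega)]
      · rw [if_neg (by tauto), if_neg (by tauto)]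
    · rw [if_neg (by tauto), if_neg (by tauto)]
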